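-- pv_equiv track=rewrite | github.com/OutSystems/CUBES | squares/DSL.py | find_consts
-- ===== SOURCE A (Python) =====
-- def find_consts(consts):
--     if consts == []:
--         return False
--     try:
--         if int(consts[0][1:-1]):
--             return True
--     except:
--         return find_consts(consts[1:])
-- ===== SOURCE B (Python) =====
-- def _parse(c):
--     try:
--         return int(c[1:-1])
--     except ValueError:
--         return None
--
-- def find_consts(consts):
--     v = next((p for p in map(_parse, consts) if p is not None), None)
--     return v is not None and v != 0
-- ===== Notes on version B (the rewrite author's own statement) =====
-- stated objective: faster
-- what changed: Replaces A's try/except tail recursion over consts[1:] slices by a single pass: a total _parse helper mapped over the list with next() picking the first parsed value, which decides the boolean; Pre_ excludes inputs whose first parseable const is 0, where A falls through and returns None instead of a bool.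
-- outside the precondition, e.g. on find_consts(['"0"']): A returns None, B returns False
import Mathlib
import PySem

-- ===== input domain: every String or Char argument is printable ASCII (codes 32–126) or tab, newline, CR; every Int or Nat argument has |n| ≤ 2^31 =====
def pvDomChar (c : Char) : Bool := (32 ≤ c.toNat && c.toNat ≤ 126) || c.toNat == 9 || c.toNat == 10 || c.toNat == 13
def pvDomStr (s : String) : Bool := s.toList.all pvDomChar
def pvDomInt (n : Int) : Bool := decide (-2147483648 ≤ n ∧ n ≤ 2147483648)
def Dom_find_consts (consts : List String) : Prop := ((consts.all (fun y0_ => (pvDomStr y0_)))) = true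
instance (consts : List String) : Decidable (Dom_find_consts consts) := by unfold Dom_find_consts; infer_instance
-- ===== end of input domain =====

-- B replaces A's try/except tail recursion over consts[1:] slices by one pass (first parseable const decides a bool).
-- ===== PORT A =====
def find_consts : List String → Option Bool
  | [] => some false
  | c :: rest =>
    match PySem.Int.ofStr? (PySem.Str.slice c (some 1) (some (-1))) with
    | some v => if v ≠ 0 then some true else none   -- `if int(...): return True`, fall-through → None
    | none => find_consts rest                       -- except: recurse on consts[1:]

-- ===== PORT B =====
-- Source B helper _parse: int(c[1:-1]) or None on ValueError
def pvParse (c : String) : Option Int :=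
  PySem.Int.ofStr? (PySem.Str.slice c (some 1) (some (-1)))

-- `v = next((p for p in map(_parse, consts) if p is not None), None); return v is not None and v != 0`
def find_consts_alt (consts : List String) : Option Bool :=
  match consts.findSome? pvParse with
  | none => some false
  | some v => some (decide (v ≠ 0))

-- ===== PRECONDITION & SPEC =====
-- Pre_ excludes inputs whose first parseable const parses to 0: there A falls through
-- and returns None instead of a bool; B returns False.
def Pre_find_consts (consts : List String) : Prop :=
  consts.findSome? (fun c => PySem.Int.ofStr? (PySem.Str.slice c (some 1) (some (-1)))) ≠ some 0
instance (consts : List String) : Decidable (Pre_find_consts consts) := by unfold Pre_find_consts; infer_instance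
def pvWitness_find_consts : List String := ["\"5\"", "x"]

def Spec_find_consts (consts : List String) (out : Option Bool) : Prop := out = find_consts_alt consts
instance (consts : List String) (out : Option Bool) : Decidable (Spec_find_consts consts out) := by unfold Spec_find_consts; infer_instance

-- ===== CLAIM (what is proved, stated in full; the proofs are below) =====
def Claim_equal_find_consts : Prop := ∀ (consts : List String), Dom_find_consts consts → Pre_find_consts consts → Spec_find_consts consts (find_consts consts)

-- ===== LEMMAS AND PROOFS =====
theorem find_consts_eq_alt (consts : List String) (h : Pre_find_consts consts) :
    find_consts consts = find_consts_alt consts := by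
  induction consts with
  | nil => rfl
  | cons c rest ih =>
    unfold Pre_find_consts at h
    rw [List.findSome?_cons] at h
    simp only [find_consts, find_consts_alt, List.findSome?_cons, pvParse]
    cases hc : PySem.Int.ofStr? (PySem.Str.slice c (some 1) (some (-1))) with
    | none =>
      rw [hc] at h
      simpa [find_consts_alt] using ih h
    | some v =>
      rw [hc] at h
      have hv : v ≠ 0 := by intro h0; exact h (by rw [h0])
      simp [hv]

-- ===== VERDICT (by name: the statement is the Claim_ definition above) =====
theorem find_consts_spec : Claim_equal_find_consts := by
  intro consts _ hp
  exact find_consts_eq_alt consts hp
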